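-- pv_equiv track=rewrite | github.com/Yanko96/Chinese-Fortune-Telling | scripts/build_index_bge.py | chunk_stats
-- ===== SOURCE A (Python) =====
-- def chunk_stats(chunks: list[str]) -> dict:
--     sizes = sorted(len(c) for c in chunks)
--     n = len(sizes)
--     return {
--         "count": n,
--         "min": sizes[0],
--         "p25": sizes[n // 4],
--         "median": sizes[n // 2],
--         "p75": sizes[3 * n // 4],
--         "max": sizes[-1],
--         "mean": int(sum(sizes) / n),
--     }
-- ===== SOURCE B (Python) =====
-- def chunk_stats(chunks: list[str]) -> dict:
--     sizes = [len(c) for c in chunks]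
--     n = len(sizes)
--
--     def qsel(xs, k):
--         # k-th smallest (0-based) via iterative quickselect, middle-element pivot,
--         # three-way partition; no full sort is ever built.
--         while True:
--             p = xs[len(xs) // 2]
--             lt = [x for x in xs if x < p]
--             eq = len([x for x in xs if x == p])
--             if k < len(lt):
--                 xs = lt
--             elif k < len(lt) + eq:
--                 return p
--             else:
--                 k = k - len(lt) - eq
--                 xs = [x for x in xs if x > p]
--
--     return {
--         "count": n,
--         "min": qsel(sizes, 0),
--         "p25": qsel(sizes, n // 4),
--         "median": qsel(sizes, n // 2),
--         "p75": qsel(sizes, 3 * n // 4),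
--         "max": qsel(sizes, n - 1),
--         "mean": int(sum(sizes) / n),
--     }
-- ===== Notes on version B (the rewrite author's own statement) =====
-- stated objective: alternative
-- what changed: Replaces the full sort of all chunk lengths with an iterative three-way-partition quickselect (middle-element pivot) run for each of the five fixed order statistics, so no sorted array is ever built; the mean stays a single sum.
-- outside the precondition, e.g. on chunk_stats([]): A raises IndexError, B raises IndexError
import Mathlib
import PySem

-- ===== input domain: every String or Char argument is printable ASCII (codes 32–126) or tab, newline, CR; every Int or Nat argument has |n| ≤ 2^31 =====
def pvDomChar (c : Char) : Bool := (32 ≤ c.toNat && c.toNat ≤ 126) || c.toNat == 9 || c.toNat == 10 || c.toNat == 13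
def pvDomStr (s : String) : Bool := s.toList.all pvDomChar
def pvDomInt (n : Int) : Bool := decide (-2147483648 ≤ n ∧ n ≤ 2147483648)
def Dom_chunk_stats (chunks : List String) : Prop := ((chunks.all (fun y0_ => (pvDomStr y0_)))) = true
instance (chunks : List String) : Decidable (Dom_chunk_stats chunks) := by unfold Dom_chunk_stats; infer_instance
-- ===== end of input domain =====

-- B replaces A's full sort with an iterative three-way quickselect per order statistic (alternative algorithm, not measured faster).
-- ===== PORT A =====
def chunk_stats (chunks : List String) : List (String × Int) :=
  let sizes := PySem.List.sorted (chunks.map (fun c => PySem.Str.len c)) (fun x => x)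
  let n : Int := sizes.length
  [("count", n),
   ("min", PySem.List.pyGetD sizes 0 0),
   ("p25", PySem.List.pyGetD sizes (PySem.Int.floordiv n 4) 0),
   ("median", PySem.List.pyGetD sizes (PySem.Int.floordiv n 2) 0),
   ("p75", PySem.List.pyGetD sizes (PySem.Int.floordiv (3 * n) 4) 0),
   ("max", PySem.List.pyGetD sizes (-1) 0),
   ("mean", PySem.Int.truncdiv sizes.sum n)]

-- ===== PORT B =====
-- the `while True` loop of Source B's qsel as tail recursion; the `[]` case is unreachable
-- under the invariant k < xs.length (Python raises IndexError there)
def qsel : List Int → Nat → Int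
  | [], _ => 0
  | x :: rest, k =>
    let xs := x :: rest
    let p := xs.getD (xs.length / 2) 0
    let lt := xs.filter (fun y => decide (y < p))
    let eqn := (xs.filter (fun y => y == p)).length
    if k < lt.length then qsel lt k
    else if k < lt.length + eqn then p
    else qsel (xs.filter (fun y => decide (p < y))) (k - lt.length - eqn)
termination_by xs _ => xs.length
decreasing_by
  · have hp : (x :: rest).getD ((x :: rest).length / 2) 0 ∈ x :: rest := by
      have hh : (x :: rest).length / 2 < (x :: rest).length :=
        Nat.div_lt_self (by simp) (by norm_num)
      rw [List.getD_eq_getElem _ _ hh]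
      exact List.getElem_mem _
    have h1 : ((x :: rest).filter (fun y => decide (y < (x :: rest).getD ((x :: rest).length / 2) 0))).length ≤ (x :: rest).length :=
      List.length_filter_le _ _
    rcases h1.lt_or_eq with h2 | h2
    · exact h2
    · have := (List.length_filter_eq_length_iff).mp h2 _ hp
      simp at this
  · have hp : (x :: rest).getD ((x :: rest).length / 2) 0 ∈ x :: rest := by
      have hh : (x :: rest).length / 2 < (x :: rest).length :=
        Nat.div_lt_self (by simp) (by norm_num)
      rw [List.getD_eq_getElem _ _ hh]
      exact List.getElem_mem _
    have h1 : ((x :: rest).filter (fun y => decide ((x :: rest).getD ((x :: rest).length / 2) 0 < y))).length ≤ (x :: rest).length :=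
      List.length_filter_le _ _
    rcases h1.lt_or_eq with h2 | h2
    · exact h2
    · have := (List.length_filter_eq_length_iff).mp h2 _ hp
      simp at this

def chunk_stats_alt (chunks : List String) : List (String × Int) :=
  let sizes := chunks.map (fun c => PySem.Str.len c)
  let n := sizes.length
  [("count", (n : Int)),
   ("min", qsel sizes 0),
   ("p25", qsel sizes (n / 4)),
   ("median", qsel sizes (n / 2)),
   ("p75", qsel sizes (3 * n / 4)),
   ("max", qsel sizes (n - 1)),
   ("mean", PySem.Int.truncdiv sizes.sum (n : Int))]

-- ===== PRECONDITION & SPEC =====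
-- On [] A raises (IndexError/ZeroDivisionError); B's qsel raises IndexError there too.
def Pre_chunk_stats (chunks : List String) : Prop := chunks ≠ []
instance (chunks : List String) : Decidable (Pre_chunk_stats chunks) := by unfold Pre_chunk_stats; infer_instance
def pvWitness_chunk_stats : List String := ["ab"]

def Spec_chunk_stats (chunks : List String) (out : List (String × Int)) : Prop := out = chunk_stats_alt chunks
instance (chunks : List String) (out : List (String × Int)) : Decidable (Spec_chunk_stats chunks out) := by unfold Spec_chunk_stats; infer_instance

-- ===== CLAIM (what is proved, stated in full; the proofs are below) =====
def Claim_equal_chunk_stats : Prop := ∀ (chunks : List String), Dom_chunk_stats chunks → Pre_chunk_stats chunks → Spec_chunk_stats chunks (chunk_stats chunks)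

-- ===== LEMMAS AND PROOFS =====

lemma pivot_mem (x : Int) (rest : List Int) :
    (x :: rest).getD ((x :: rest).length / 2) 0 ∈ x :: rest := by
  have hh : (x :: rest).length / 2 < (x :: rest).length :=
    Nat.div_lt_self (by simp) (by norm_num)
  rw [List.getD_eq_getElem _ _ hh]
  exact List.getElem_mem _

lemma len_filter_lt (xs : List Int) (p : Int) (hp : p ∈ xs) :
    (xs.filter (fun y => decide (y < p))).length < xs.length := by
  have h1 : (xs.filter (fun y => decide (y < p))).length ≤ xs.length :=
    List.length_filter_le _ _
  rcases h1.lt_or_eq with h2 | h2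
  · exact h2
  · have := (List.length_filter_eq_length_iff).mp h2 _ hp
    simp at this

lemma len_filter_gt (xs : List Int) (p : Int) (hp : p ∈ xs) :
    (xs.filter (fun y => decide (p < y))).length < xs.length := by
  have h1 : (xs.filter (fun y => decide (p < y))).length ≤ xs.length :=
    List.length_filter_le _ _
  rcases h1.lt_or_eq with h2 | h2
  · exact h2
  · have := (List.length_filter_eq_length_iff).mp h2 _ hp
    simp at this

-- three-way partition of xs at pivot p is a permutation of xs
lemma partition_perm (p : Int) (xs : List Int) :
    (xs.filter (fun y => decide (y < p)) ++
      (xs.filter (fun y => y == p) ++ xs.filter (fun y => decide (p < y)))).Perm xs := by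
  induction xs with
  | nil => simp
  | cons a t ih =>
    rcases lt_trichotomy a p with h | h | h
    · simpa [List.filter_cons, h, ne_of_lt h, not_lt.mpr h.le] using ih.cons a
    · subst h
      have e1 : (List.filter (fun y => decide (y < a)) (a :: t) ++
          (List.filter (fun y => y == a) (a :: t) ++ List.filter (fun y => decide (a < y)) (a :: t)))
          = List.filter (fun y => decide (y < a)) t ++
            a :: (List.filter (fun y => y == a) t ++ List.filter (fun y => decide (a < y)) t) := by
        simp
      rw [e1]
      exact List.Perm.trans List.perm_middle (ih.cons a)
    · have h1 : ¬ a < p := not_lt.mpr h.le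
      have h2 : ¬ a = p := (ne_of_gt h)
      have e1 : (List.filter (fun y => decide (y < p)) (a :: t) ++
          (List.filter (fun y => y == p) (a :: t) ++ List.filter (fun y => decide (p < y)) (a :: t)))
          = (List.filter (fun y => decide (y < p)) t ++ List.filter (fun y => y == p) t) ++
            a :: List.filter (fun y => decide (p < y)) t := by
        simp [h, h1, h2]
      have e2 : (List.filter (fun y => decide (y < p)) t ++ List.filter (fun y => y == p) t) ++
            List.filter (fun y => decide (p < y)) t
          = List.filter (fun y => decide (y < p)) t ++
            (List.filter (fun y => y == p) t ++ List.filter (fun y => decide (p < y)) t) := by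
        simp [List.append_assoc]
      rw [e1]
      exact List.Perm.trans List.perm_middle (e2 ▸ (ih.cons a))

-- filter (== p) is a replicate of p
lemma filter_eq_replicate (p : Int) (xs : List Int) :
    xs.filter (fun y => y == p) = List.replicate (xs.filter (fun y => y == p)).length p := by
  induction xs with
  | nil => simp
  | cons a t ih =>
    by_cases h : a = p
    · subst h; simpa [List.filter_cons, List.replicate_succ] using ih
    · simpa [List.filter_cons, h] using ih

-- sorted(xs) decomposes along the three-way partition at any pivot
lemma sorted_partition (p : Int) (xs : List Int) :
    PySem.List.sorted xs (fun y => y) =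
      PySem.List.sorted (xs.filter (fun y => decide (y < p))) (fun y => y) ++
        (List.replicate (xs.filter (fun y => y == p)).length p ++
          PySem.List.sorted (xs.filter (fun y => decide (p < y))) (fun y => y)) := by
  apply PySem.List.sorted_id_eq_of_perm_of_pairwise
  · refine List.Perm.trans ?_ (partition_perm p xs)
    refine List.Perm.append (PySem.List.sorted_perm _ _ _)
      (List.Perm.append ?_ (PySem.List.sorted_perm _ _ _))
    rw [← filter_eq_replicate]
  · have hlt : ∀ y ∈ PySem.List.sorted (xs.filter (fun y => decide (y < p))) (fun y => y), y < p := by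
      intro y hy
      have := (PySem.List.mem_sorted _ _ _ _).mp hy
      simpa using List.of_mem_filter this
    have hgt : ∀ y ∈ PySem.List.sorted (xs.filter (fun y => decide (p < y))) (fun y => y), p < y := by
      intro y hy
      have := (PySem.List.mem_sorted _ _ _ _).mp hy
      simpa using List.of_mem_filter this
    rw [List.pairwise_append, List.pairwise_append]
    refine ⟨PySem.List.sorted_pairwise _ _, ⟨?_, PySem.List.sorted_pairwise _ _, ?_⟩, ?_⟩
    · rw [List.pairwise_replicate]; right; exact le_refl p
    · intro a ha b hb
      have ha' : a = p := List.eq_of_mem_replicate ha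
      exact ha' ▸ (hgt b hb).le
    · intro a ha b hb
      rcases List.mem_append.mp hb with h | h
      · exact (List.eq_of_mem_replicate h) ▸ (hlt a ha).le
      · exact ((hlt a ha).trans (hgt b h)).le

-- quickselect computes the k-th element of the sorted list
lemma qsel_eq_sorted : ∀ (n : Nat) (xs : List Int), xs.length ≤ n → ∀ k : Nat, k < xs.length →
    qsel xs k = (PySem.List.sorted xs (fun y => y)).getD k 0 := by
  intro n
  induction n with
  | zero => intro xs hle k hk; omega
  | succ n ih =>
    intro xs hle k hk
    match xs with
    | [] => simp at hk
    | x :: rest =>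
      rw [qsel]
      split_ifs with h1 h2
      · -- k is in the strictly-smaller-than-pivot block
        set p := (x :: rest).getD ((x :: rest).length / 2) 0 with hp
        have hmem : p ∈ x :: rest := pivot_mem x rest
        have hlt := len_filter_lt (x :: rest) p hmem
        have hslen : (PySem.List.sorted ((x :: rest).filter (fun y => decide (y < p))) (fun y => y)).length
            = ((x :: rest).filter (fun y => decide (y < p))).length := PySem.List.length_sorted _ _ _
        rw [sorted_partition p (x :: rest), List.getD_append _ _ _ _ (by rw [hslen]; exact h1)]
        exact ih _ (by omega) k h1
      · -- k lands on the pivot block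
        set p := (x :: rest).getD ((x :: rest).length / 2) 0 with hp
        have hslen : (PySem.List.sorted ((x :: rest).filter (fun y => decide (y < p))) (fun y => y)).length
            = ((x :: rest).filter (fun y => decide (y < p))).length := PySem.List.length_sorted _ _ _
        rw [sorted_partition p (x :: rest),
          List.getD_append_right _ _ _ _ (by rw [hslen]; omega),
          List.getD_append _ _ _ _ (by rw [List.length_replicate, hslen]; omega),
          List.getD_replicate _ (by rw [hslen]; omega)]
      · -- k is in the strictly-greater-than-pivot block
        set p := (x :: rest).getD ((x :: rest).length / 2) 0 with hp
        have hmem : p ∈ x :: rest := pivot_mem x rest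
        have hgt := len_filter_gt (x :: rest) p hmem
        have hslen : (PySem.List.sorted ((x :: rest).filter (fun y => decide (y < p))) (fun y => y)).length
            = ((x :: rest).filter (fun y => decide (y < p))).length := PySem.List.length_sorted _ _ _
        have hsum : ((x :: rest).filter (fun y => decide (y < p))).length
            + ((x :: rest).filter (fun y => y == p)).length
            + ((x :: rest).filter (fun y => decide (p < y))).length = (x :: rest).length := by
          have := (partition_perm p (x :: rest)).length_eq
          simpa [Nat.add_assoc] using this
        have hk' : k - ((x :: rest).filter (fun y => decide (y < p))).length
            - ((x :: rest).filter (fun y => y == p)).length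
            < ((x :: rest).filter (fun y => decide (p < y))).length := by omega
        rw [sorted_partition p (x :: rest),
          List.getD_append_right _ _ _ _ (by rw [hslen]; omega),
          List.getD_append_right _ _ _ _ (by rw [List.length_replicate]; omega)]
        rw [ih _ (by omega) _ hk']
        congr 1
        rw [List.length_replicate, hslen]

-- ===== VERDICT (by name: the statement is the Claim_ definition above) =====
theorem chunk_stats_spec : Claim_equal_chunk_stats := by
  intro chunks _ hpre
  unfold Spec_chunk_stats chunk_stats chunk_stats_alt
  have hm : 1 ≤ (chunks.map (fun c => PySem.Str.len c)).length := by
    rcases chunks with _ | ⟨c, t⟩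
    · exact absurd rfl hpre
    · simp
  set sizes := chunks.map (fun c => PySem.Str.len c) with hsizes
  have hSlen : (PySem.List.sorted sizes (fun x => x)).length = sizes.length :=
    PySem.List.length_sorted _ _ _
  have hSne : PySem.List.sorted sizes (fun x => x) ≠ [] := by
    intro h; rw [h] at hSlen; simp at hSlen; omega
  have q : ∀ k : Nat, k < sizes.length →
      qsel sizes k = (PySem.List.sorted sizes (fun x => x)).getD k 0 :=
    qsel_eq_sorted sizes.length sizes le_rfl
  have h25 : PySem.Int.floordiv (sizes.length : Int) 4 = ((sizes.length / 4 : Nat) : Int) := by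
    exact_mod_cast PySem.Int.floordiv_natCast sizes.length 4
  have h50 : PySem.Int.floordiv (sizes.length : Int) 2 = ((sizes.length / 2 : Nat) : Int) := by
    exact_mod_cast PySem.Int.floordiv_natCast sizes.length 2
  have h75 : PySem.Int.floordiv (3 * (sizes.length : Int)) 4 = ((3 * sizes.length / 4 : Nat) : Int) := by
    exact_mod_cast PySem.Int.floordiv_natCast (3 * sizes.length) 4
  have e_min : PySem.List.pyGetD (PySem.List.sorted sizes (fun x => x)) 0 0 = qsel sizes 0 := by
    rw [PySem.List.pyGetD_zero, q 0 (by omega)]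
  have e_p25 : PySem.List.pyGetD (PySem.List.sorted sizes (fun x => x))
      (PySem.Int.floordiv (sizes.length : Int) 4) 0 = qsel sizes (sizes.length / 4) := by
    rw [h25, PySem.List.pyGetD_natCast, q (sizes.length / 4) (by omega)]
  have e_med : PySem.List.pyGetD (PySem.List.sorted sizes (fun x => x))
      (PySem.Int.floordiv (sizes.length : Int) 2) 0 = qsel sizes (sizes.length / 2) := by
    rw [h50, PySem.List.pyGetD_natCast, q (sizes.length / 2) (by omega)]
  have e_p75 : PySem.List.pyGetD (PySem.List.sorted sizes (fun x => x))
      (PySem.Int.floordiv (3 * (sizes.length : Int)) 4) 0 = qsel sizes (3 * sizes.length / 4) := by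
    rw [h75, PySem.List.pyGetD_natCast, q (3 * sizes.length / 4) (by omega)]
  have e_max : PySem.List.pyGetD (PySem.List.sorted sizes (fun x => x)) (-1) 0
      = qsel sizes (sizes.length - 1) := by
    rw [PySem.List.pyGetD_neg_one _ _ hSne, List.getLast_eq_getElem,
      q (sizes.length - 1) (by omega), List.getD_eq_getElem _ _ (by omega)]
    simp only [hSlen]
  simp only [hSlen, e_min, e_p25, e_med, e_p75, e_max]
  rw [(PySem.List.sorted_perm sizes (fun x => x) false).sum_eq]
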